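-- pv_equiv track=rewrite | github.com/goldmanron/cs1001 | hw5_328274329.py | almost_prefix_suffix_overlap_hash1
-- ===== SOURCE A (Python) =====
-- class Dict:
--     def __init__(self, m, hash_func=hash):
--         """ initial hash table, m empty entries """
--         self.table = [[] for i in range(m)]
--         self.hash_mod = lambda x: hash_func(x) % m
--
--     def __repr__(self):
--         L = [self.table[i] for i in range(len(self.table))]
--         return "".join([str(i) + " " + str(L[i]) + "\n" for i in range(len(self.table))])
--
--     def insert(self, key, value):
--         """ insert key,value into table
--             Allow repetitions of keys """
--         i = self.hash_mod(key)  # hash on key only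
--         item = [key, value]  # pack into one item
--         self.table[i].append(item)
--
--     def find(self, key):
--         """ returns ALL values of key as a list, empty list if none """
--         i = self.hash_mod(key)
--         return [item[1] for item in self.table[i] if item[0] == key]
--
-- def almost_prefix_suffix_overlap_hash1(lst, k):
--     n = len(lst)
--
--     d = Dict(n)
--
--     for i in range(n):
--         pref = lst[i][:k]
--         for j in range(k):
--             pref1 = ''.join([pref[m] if m != j else '*' for m in range(k)])
--             d.insert(pref1, i)
--
--     l = []
--     memo = set((i, i) for i in range(n))
--     for p in range(k):
--         for i in range(n):
--             suff = lst[i][-k:]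
--             for j in d.find(''.join([suff[m] if m != p else '*' for m in range(k)])):
--                 if (i, j) not in memo:
--                     l += [(j, i)]
--                     memo.add((i, j))
--     return list(l)
-- ===== SOURCE B (Python) =====
-- def almost_prefix_suffix_overlap_hash1(lst, k):
--     n = len(lst)
--     prefs = [lst[i][:k] for i in range(n)]
--     suffs = [lst[i][-k:] for i in range(n)]
--     out = []
--     seen = set((i, i) for i in range(n))
--     for p in range(k):
--         for i in range(n):
--             for j in range(n):
--                 if (i, j) not in seen and any(
--                     all(('*' if m == p else suffs[i][m]) == ('*' if m == q else prefs[j][m])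
--                         for m in range(k))
--                     for q in range(k)):
--                     out.append((j, i))
--                     seen.add((i, j))
--     return out
-- ===== Notes on version B (the rewrite author's own statement) =====
-- stated objective: simpler
-- what changed: B deletes A's hand-rolled Dict hash table (wildcard patterns inserted per (i,j) and looked up per (p,i)) and instead compares suffix/prefix wildcard patterns pairwise in a direct for p/for i/for j loop, with the same memo-based dedup and the same output order.
import Mathlib
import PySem

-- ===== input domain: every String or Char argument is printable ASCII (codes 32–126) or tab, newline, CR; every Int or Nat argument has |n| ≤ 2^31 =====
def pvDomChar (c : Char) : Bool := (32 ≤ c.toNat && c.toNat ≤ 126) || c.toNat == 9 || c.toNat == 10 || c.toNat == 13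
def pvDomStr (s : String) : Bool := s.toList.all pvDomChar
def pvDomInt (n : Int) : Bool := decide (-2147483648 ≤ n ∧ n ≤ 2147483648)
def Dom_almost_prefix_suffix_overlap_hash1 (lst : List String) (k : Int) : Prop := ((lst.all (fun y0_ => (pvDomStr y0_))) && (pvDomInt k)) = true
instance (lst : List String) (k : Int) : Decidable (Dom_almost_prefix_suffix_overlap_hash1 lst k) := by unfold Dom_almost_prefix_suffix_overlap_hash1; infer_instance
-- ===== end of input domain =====

-- B replaces A's hand-rolled wildcard-pattern hash table by a direct pairwise pattern
-- comparison with the same (p,i,j) order and memo dedup: simpler, no Dict class.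


-- ===== PORT A =====

-- pref[m] / suff[m]: Python raises IndexError out of range; the default '?' is only
-- reachable outside Pre_ (under Pre_ every indexed position is in range).
def pvCharAt (s : List Char) (m : Int) : Char := (PySem.List.pyGet? s m).getD '?'

-- ''.join([pref[m] if m != j else '*' for m in range(k)])
def pvPatA (pref : List Char) (j k : Int) : List Char :=
  (PySem.List.pyRange 0 k 1).map (fun m => if m ≠ j then pvCharAt pref m else '*')

-- lst[i][:k]  and  lst[i][-k:]
def pvPrefOf (lst : List String) (k i : Int) : List Char :=
  PySem.List.slice ((PySem.List.pyGetD lst i "").toList) none (some k)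
def pvSuffOf (lst : List String) (k i : Int) : List Char :=
  PySem.List.slice ((PySem.List.pyGetD lst i "").toList) (some (-k)) none

-- Dict.insert / Dict.find from A.  Python's default hash on str is process-randomised and the
-- function's result is independent of it (find compares full keys and buckets keep insertion
-- order), so the port fixes hash_func = 0: i = 0 % m and every item lands in bucket 0.
def pvDictInsert (tb : List (List (List Char × Int))) (key : List Char) (v : Int) :
    List (List (List Char × Int)) :=
  let i := PySem.Int.mod 0 (tb.length)
  PySem.List.pySetD tb i (PySem.List.pyGetD tb i [] ++ [(key, v)])

def pvDictFind (tb : List (List (List Char × Int))) (key : List Char) : List Int :=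
  let i := PySem.Int.mod 0 (tb.length)
  ((PySem.List.pyGetD tb i []).filter (fun item => item.1 == key)).map (fun item => item.2)

def almost_prefix_suffix_overlap_hash1 (lst : List String) (k : Int) : List (Int × Int) :=
  let n : Int := lst.length
  let table :=
    (PySem.List.pyRange 0 n 1).foldl (fun tb i =>
      (PySem.List.pyRange 0 k 1).foldl (fun tb j =>
        pvDictInsert tb (pvPatA (pvPrefOf lst k i) j k) i) tb)
      (List.replicate n.toNat [])
  let st :=
    (PySem.List.pyRange 0 k 1).foldl (fun st p =>
      (PySem.List.pyRange 0 n 1).foldl (fun st i =>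
        (pvDictFind table (pvPatA (pvSuffOf lst k i) p k)).foldl
          (fun (st : List (Int × Int) × PySem.Set (Int × Int)) j =>
            if (i, j) ∉ st.2 then (st.1 ++ [(j, i)], PySem.Set.add st.2 (i, j)) else st) st) st)
      ([], PySem.Set.ofList ((PySem.List.pyRange 0 n 1).map (fun i => (i, i))))
  st.1

-- ===== PORT B =====
def almost_prefix_suffix_overlap_hash1_alt (lst : List String) (k : Int) : List (Int × Int) :=
  let n : Int := lst.length
  let prefs := (PySem.List.pyRange 0 n 1).map (fun i => pvPrefOf lst k i)
  let suffs := (PySem.List.pyRange 0 n 1).map (fun i => pvSuffOf lst k i)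
  let st :=
    (PySem.List.pyRange 0 k 1).foldl (fun st p =>
      (PySem.List.pyRange 0 n 1).foldl (fun st i =>
        (PySem.List.pyRange 0 n 1).foldl
          (fun (st : List (Int × Int) × PySem.Set (Int × Int)) j =>
            if (i, j) ∉ st.2 ∧
               ((PySem.List.pyRange 0 k 1).any (fun q =>
                 (PySem.List.pyRange 0 k 1).all (fun m =>
                   (if m = p then '*' else pvCharAt (PySem.List.pyGetD suffs i []) m)
                     == (if m = q then '*' else pvCharAt (PySem.List.pyGetD prefs j []) m)))) = true
            then (st.1 ++ [(j, i)], PySem.Set.add st.2 (i, j)) else st) st) st)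
      ([], PySem.Set.ofList ((PySem.List.pyRange 0 n 1).map (fun i => (i, i))))
  st.1

-- ===== PRECONDITION & SPEC =====
-- Pre_ excludes exactly the inputs where Python A raises IndexError: k ≥ 2 together with
-- some string shorter than k (for k ≤ 1 the single position 0 is always the wildcard and
-- is never indexed, so A returns).
def Pre_almost_prefix_suffix_overlap_hash1 (lst : List String) (k : Int) : Prop :=
  k ≤ 1 ∨ ∀ s ∈ lst, k ≤ (s.toList.length : Int)
instance (lst : List String) (k : Int) : Decidable (Pre_almost_prefix_suffix_overlap_hash1 lst k) := by unfold Pre_almost_prefix_suffix_overlap_hash1; infer_instance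
def pvWitness_almost_prefix_suffix_overlap_hash1 : List String × Int := (["abc", "bcd"], 2)
def Spec_almost_prefix_suffix_overlap_hash1 (lst : List String) (k : Int) (out : List (Int × Int)) : Prop := out = almost_prefix_suffix_overlap_hash1_alt lst k
instance (lst : List String) (k : Int) (out : List (Int × Int)) : Decidable (Spec_almost_prefix_suffix_overlap_hash1 lst k out) := by unfold Spec_almost_prefix_suffix_overlap_hash1; infer_instance

-- ===== CLAIM (what is proved, stated in full; the proofs are below) =====
def Claim_equal_almost_prefix_suffix_overlap_hash1 : Prop := ∀ (lst : List String) (k : Int), Dom_almost_prefix_suffix_overlap_hash1 lst k → Pre_almost_prefix_suffix_overlap_hash1 lst k → Spec_almost_prefix_suffix_overlap_hash1 lst k (almost_prefix_suffix_overlap_hash1 lst k)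


-- ===== LEMMAS AND PROOFS =====

-- The shared append-or-skip step of both second phases.
def pvStep (i : Int) (st : List (Int × Int) × PySem.Set (Int × Int)) (j : Int) :
    List (Int × Int) × PySem.Set (Int × Int) :=
  if (i, j) ∉ st.2 then (st.1 ++ [(j, i)], PySem.Set.add st.2 (i, j)) else st

theorem pvStep_absorb (i j : Int) (st : List (Int × Int) × PySem.Set (Int × Int)) :
    pvStep i (pvStep i st j) j = pvStep i st j := by
  by_cases h : (i, j) ∈ st.2
  · simp [pvStep, h]
  · simp [pvStep, h]

theorem pvStep_const_fold {α : Type} (l : List α) (i j : Int)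
    (st : List (Int × Int) × PySem.Set (Int × Int)) :
    (l.map (fun _ => j)).foldl (pvStep i) (pvStep i st j) = pvStep i st j := by
  induction l generalizing st with
  | nil => rfl
  | cons a t ih =>
      rw [List.map_cons, List.foldl_cons, pvStep_absorb]
      exact ih st

-- repeated occurrences of the same j collapse to a single step (the memo absorbs them)
theorem pvStep_block {α : Type} (qs : List α) (i j : Int)
    (st : List (Int × Int) × PySem.Set (Int × Int)) :
    (qs.map (fun _ => j)).foldl (pvStep i) st = if qs.isEmpty then st else pvStep i st j := by
  cases qs with
  | nil => rfl
  | cons a t =>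
      rw [List.map_cons, List.foldl_cons]
      exact pvStep_const_fold t i j st

-- with the fixed hash every insert appends to bucket 0
theorem pvDictInsert_cons (b : List (List Char × Int)) (rest : List (List (List Char × Int)))
    (key : List Char) (v : Int) :
    pvDictInsert (b :: rest) key v = (b ++ [(key, v)]) :: rest := by
  simp [pvDictInsert, pysem]

theorem pvDictFind_cons (b : List (List Char × Int)) (rest : List (List (List Char × Int)))
    (key : List Char) :
    pvDictFind (b :: rest) key
      = ((b.filter (fun item => item.1 == key)).map (fun item => item.2)) := by
  simp [pvDictFind, pysem]

theorem pvInsertFoldHead (g : Int → List Char) (L : List Int) (v : Int)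
    (b : List (List Char × Int)) (rest : List (List (List Char × Int))) :
    L.foldl (fun tb j => pvDictInsert tb (g j) v) (b :: rest)
      = (b ++ L.map (fun j => (g j, v))) :: rest := by
  induction L generalizing b with
  | nil => simp
  | cons a t ih =>
      rw [List.foldl_cons, pvDictInsert_cons, ih]
      simp

-- the filling phase: bucket 0 collects all patterns in (i, j) insertion order
theorem pvTableHead (lst : List String) (k : Int) (L : List Int)
    (b : List (List Char × Int)) (rest : List (List (List Char × Int))) :
    L.foldl (fun tb i =>
        (PySem.List.pyRange 0 k 1).foldl (fun tb j =>
          pvDictInsert tb (pvPatA (pvPrefOf lst k i) j k) i) tb) (b :: rest)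
      = (b ++ L.flatMap (fun i =>
          (PySem.List.pyRange 0 k 1).map (fun j => (pvPatA (pvPrefOf lst k i) j k, i)))) :: rest := by
  induction L generalizing b with
  | nil => simp
  | cons a t ih =>
      rw [List.foldl_cons, pvInsertFoldHead, ih]
      simp

-- pattern-string equality is B's positionwise comparison with wildcards at p and q
theorem pvPat_eq_iff (suff pref : List Char) (p q k : Int) :
    (pvPatA (pref) q k == pvPatA (suff) p k)
      = ((PySem.List.pyRange 0 k 1).all (fun m =>
          (if m = p then '*' else pvCharAt suff m)
            == (if m = q then '*' else pvCharAt pref m))) := by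
  rw [Bool.eq_iff_iff, beq_iff_eq, List.all_eq_true]
  unfold pvPatA
  rw [List.map_eq_map_iff]
  constructor
  · intro h m hm
    have := h m hm
    simp only [ite_not] at this
    rw [beq_iff_eq]
    exact this.symm
  · intro h m hm
    have := h m hm
    rw [beq_iff_eq] at this
    simp only [ite_not]
    exact this.symm

-- the body of A's i-loop (a fold over the hash lookup) equals the body of B's i-loop
theorem pvInner_eq (lst : List String) (k p i : Int)
    (hi : i ∈ PySem.List.pyRange 0 (lst.length : Int) 1)
    (rest : List (List (List Char × Int)))
    (st : List (Int × Int) × PySem.Set (Int × Int)) :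
    (pvDictFind (((PySem.List.pyRange 0 (lst.length : Int) 1).flatMap (fun i' =>
          (PySem.List.pyRange 0 k 1).map (fun j => (pvPatA (pvPrefOf lst k i') j k, i')))) :: rest)
        (pvPatA (pvSuffOf lst k i) p k)).foldl (pvStep i) st
    = (PySem.List.pyRange 0 (lst.length : Int) 1).foldl
        (fun st j =>
          if (i, j) ∉ st.2 ∧
             ((PySem.List.pyRange 0 k 1).any (fun q =>
               (PySem.List.pyRange 0 k 1).all (fun m =>
                 (if m = p then '*'
                  else pvCharAt (PySem.List.pyGetD
                    ((PySem.List.pyRange 0 (lst.length : Int) 1).map (fun i' => pvSuffOf lst k i')) i []) m)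
                   == (if m = q then '*'
                       else pvCharAt (PySem.List.pyGetD
                         ((PySem.List.pyRange 0 (lst.length : Int) 1).map (fun i' => pvPrefOf lst k i')) j []) m)))) = true
          then (st.1 ++ [(j, i)], PySem.Set.add st.2 (i, j)) else st) st := by
  obtain ⟨hi0, hi1⟩ := (PySem.List.mem_pyRange_one).mp hi
  have hsg : PySem.List.pyGetD
      ((PySem.List.pyRange 0 (lst.length : Int) 1).map (fun i' => pvSuffOf lst k i')) i []
      = pvSuffOf lst k i :=
    PySem.List.pyGetD_map_pyRange_of_nonneg _ _ _ _ hi0 hi1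
  rw [pvDictFind_cons, List.filter_flatMap, List.map_flatMap]
  simp only [List.filter_map, List.map_map, Function.comp_def]
  rw [List.foldl_flatMap]
  refine PySem.List.foldl_congr_mem _ _ _ _ ?_
  intro st' j hj
  obtain ⟨hj0, hj1⟩ := (PySem.List.mem_pyRange_one).mp hj
  have hpg : PySem.List.pyGetD
      ((PySem.List.pyRange 0 (lst.length : Int) 1).map (fun i' => pvPrefOf lst k i')) j []
      = pvPrefOf lst k j :=
    PySem.List.pyGetD_map_pyRange_of_nonneg _ _ _ _ hj0 hj1
  rw [pvStep_block]
  rw [hsg, hpg]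
  have hfc : (PySem.List.pyRange 0 k 1).filter
        (fun q => (pvPatA (pvPrefOf lst k j) q k == pvPatA (pvSuffOf lst k i) p k))
      = (PySem.List.pyRange 0 k 1).filter
        (fun q => (PySem.List.pyRange 0 k 1).all (fun m =>
          (if m = p then '*' else pvCharAt (pvSuffOf lst k i) m)
            == (if m = q then '*' else pvCharAt (pvPrefOf lst k j) m))) :=
    List.filter_congr (fun q _ => pvPat_eq_iff (pvSuffOf lst k i) (pvPrefOf lst k j) p q k)
  rw [hfc]
  by_cases hany : ((PySem.List.pyRange 0 k 1).any (fun q =>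
      (PySem.List.pyRange 0 k 1).all (fun m =>
        (if m = p then '*' else pvCharAt (pvSuffOf lst k i) m)
          == (if m = q then '*' else pvCharAt (pvPrefOf lst k j) m)))) = true
  · obtain ⟨q, hqmem, hq⟩ := List.any_eq_true.mp hany
    have hne : ((PySem.List.pyRange 0 k 1).filter (fun q => (PySem.List.pyRange 0 k 1).all (fun m =>
        (if m = p then '*' else pvCharAt (pvSuffOf lst k i) m)
          == (if m = q then '*' else pvCharAt (pvPrefOf lst k j) m)))).isEmpty = false := by
      rcases h : (PySem.List.pyRange 0 k 1).filter (fun q => (PySem.List.pyRange 0 k 1).all (fun m =>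
        (if m = p then '*' else pvCharAt (pvSuffOf lst k i) m)
          == (if m = q then '*' else pvCharAt (pvPrefOf lst k j) m))) with _ | ⟨a, t⟩
      · exact absurd (List.filter_eq_nil_iff.mp h q hqmem) (by simp [hq])
      · rfl
    rw [hne]
    simp only [hany, and_true]
    rfl
  · have hb : ((PySem.List.pyRange 0 k 1).any (fun q =>
      (PySem.List.pyRange 0 k 1).all (fun m =>
        (if m = p then '*' else pvCharAt (pvSuffOf lst k i) m)
          == (if m = q then '*' else pvCharAt (pvPrefOf lst k j) m)))) = false := by
      simpa using hany
    have hnil : (PySem.List.pyRange 0 k 1).filter (fun q => (PySem.List.pyRange 0 k 1).all (fun m =>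
        (if m = p then '*' else pvCharAt (pvSuffOf lst k i) m)
          == (if m = q then '*' else pvCharAt (pvPrefOf lst k j) m))) = [] := by
      refine List.filter_eq_nil_iff.mpr ?_
      intro q hqmem hq
      exact hany (List.any_eq_true.mpr ⟨q, hqmem, hq⟩)
    rw [hnil]
    simp [hb]

theorem almost_prefix_suffix_overlap_hash1_spec' (lst : List String) (k : Int) :
    almost_prefix_suffix_overlap_hash1 lst k = almost_prefix_suffix_overlap_hash1_alt lst k := by
  cases lst with
  | nil =>
      simp [almost_prefix_suffix_overlap_hash1, almost_prefix_suffix_overlap_hash1_alt,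
        PySem.List.pyRange_one_eq_nil (le_refl (0 : Int))]
  | cons s lt =>
      simp only [almost_prefix_suffix_overlap_hash1, almost_prefix_suffix_overlap_hash1_alt]
      rw [show List.replicate (((s :: lt).length : Int)).toNat ([] : List (List Char × Int))
            = [] :: List.replicate lt.length [] by simp [List.replicate_succ]]
      rw [pvTableHead, List.nil_append]
      refine congrArg Prod.fst ?_
      refine PySem.List.foldl_congr_mem _ _ _ _ ?_
      intro st p _
      refine PySem.List.foldl_congr_mem _ _ _ _ ?_
      intro st' i hi
      exact pvInner_eq (s :: lt) k p i hi _ st'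

-- ===== VERDICT (by name: the statement is the Claim_ definition above) =====
theorem almost_prefix_suffix_overlap_hash1_spec : Claim_equal_almost_prefix_suffix_overlap_hash1 := by
  intro lst k _ _
  exact almost_prefix_suffix_overlap_hash1_spec' lst k
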